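-- pv_equiv track=rewrite | github.com/hannawong/super_ggformat | ggplot_format_v2.py | arrange_sentence_order
-- ===== SOURCE A (Python) =====
-- def arrange_sentence_order(atom_sentences):
--     sort_atom_sentences = []
--     for sentence in atom_sentences:
--         if(sentence[:7]=="library"):
--             sort_atom_sentences.insert(0,sentence)
--         else:
--             sort_atom_sentences.append(sentence)
--     return sort_atom_sentences
-- ===== SOURCE B (Python) =====
-- def arrange_sentence_order(atom_sentences):
--     libraries = []
--     others = []
--     for sentence in atom_sentences:
--         if sentence[:7] == "library":
--             libraries.append(sentence)
--         else:
--             others.append(sentence)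
--     return libraries[::-1] + others
-- ===== Notes on version B (the rewrite author's own statement) =====
-- stated objective: alternative
-- what changed: Replaces repeated insert(0, ...) into one mixed list with a single pass that appends into two separate lists and returns reversed(libraries) + others.
import Mathlib
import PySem

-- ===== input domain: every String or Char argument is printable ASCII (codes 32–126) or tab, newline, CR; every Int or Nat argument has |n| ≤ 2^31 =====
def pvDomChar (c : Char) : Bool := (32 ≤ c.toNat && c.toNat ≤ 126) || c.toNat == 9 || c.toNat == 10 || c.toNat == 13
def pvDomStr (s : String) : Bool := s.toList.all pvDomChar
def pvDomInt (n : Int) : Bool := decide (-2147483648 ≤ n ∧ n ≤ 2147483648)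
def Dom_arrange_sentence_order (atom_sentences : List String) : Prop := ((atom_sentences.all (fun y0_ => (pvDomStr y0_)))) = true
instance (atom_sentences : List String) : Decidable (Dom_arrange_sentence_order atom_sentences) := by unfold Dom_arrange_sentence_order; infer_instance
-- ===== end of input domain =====

-- B splits into two lists in one pass and returns reversed(libraries) ++ others, instead of A's insert(0, ...) into one mixed list.

-- ===== PORT A =====
def pvIsLib (sentence : String) : Bool :=
  PySem.Str.slice sentence none (some 7) == "library"

def arrange_sentence_order (atom_sentences : List String) : List String :=
  atom_sentences.foldl
    (fun sort_atom_sentences sentence =>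
      if pvIsLib sentence then
        sentence :: sort_atom_sentences            -- .insert(0, sentence)
      else
        sort_atom_sentences ++ [sentence])         -- .append(sentence)
    []

-- ===== PORT B =====
-- single forward pass splitting into (libraries, others)
def pvSplit (atom_sentences : List String) : List String × List String :=
  match atom_sentences with
  | [] => ([], [])
  | sentence :: rest =>
      let (libraries, others) := pvSplit rest
      if pvIsLib sentence then (sentence :: libraries, others)
      else (libraries, sentence :: others)

def arrange_sentence_order_alt (atom_sentences : List String) : List String :=
  let (libraries, others) := pvSplit atom_sentences
  libraries.reverse ++ others

-- ===== PRECONDITION & SPEC =====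
def Spec_arrange_sentence_order (atom_sentences : List String) (out : List String) : Prop := out = arrange_sentence_order_alt atom_sentences
instance (atom_sentences : List String) (out : List String) : Decidable (Spec_arrange_sentence_order atom_sentences out) := by unfold Spec_arrange_sentence_order; infer_instance

-- ===== CLAIM (what is proved, stated in full; the proofs are below) =====
def Claim_equal_arrange_sentence_order : Prop := ∀ (atom_sentences : List String), Dom_arrange_sentence_order atom_sentences → Spec_arrange_sentence_order atom_sentences (arrange_sentence_order atom_sentences)

-- ===== LEMMAS AND PROOFS =====
theorem pvFold_eq_split (xs L O : List String) :
    xs.foldl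
      (fun s sentence => if pvIsLib sentence then sentence :: s else s ++ [sentence])
      (L.reverse ++ O)
    = (L ++ (pvSplit xs).1).reverse ++ (O ++ (pvSplit xs).2) := by
  induction xs generalizing L O with
  | nil => simp [pvSplit]
  | cons x xs ih =>
      by_cases h : pvIsLib x
      · have h1 : pvSplit (x :: xs) = (x :: (pvSplit xs).1, (pvSplit xs).2) := by
          simp [pvSplit, h]
        have h2 : x :: (L.reverse ++ O) = (L ++ [x]).reverse ++ O := by simp
        simp only [List.foldl_cons, if_pos h, h1, h2, ih (L ++ [x]) O]
        simp
      · have h1 : pvSplit (x :: xs) = ((pvSplit xs).1, x :: (pvSplit xs).2) := by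
          simp [pvSplit, h]
        have h2 : (L.reverse ++ O) ++ [x] = L.reverse ++ (O ++ [x]) := by simp
        simp only [List.foldl_cons, if_neg h, h1, h2, ih L (O ++ [x])]
        simp

-- ===== VERDICT (by name: the statement is the Claim_ definition above) =====
theorem arrange_sentence_order_spec : Claim_equal_arrange_sentence_order := by
  intro xs _
  show arrange_sentence_order xs = arrange_sentence_order_alt xs
  have h := pvFold_eq_split xs [] []
  simpa [arrange_sentence_order, arrange_sentence_order_alt] using h
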